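-- pv_equiv track=rewrite | github.com/flowersteam/spatio-temporal-language-transformers | src/grammar/temporal_logic.py | detect_consumed_predicate
-- ===== SOURCE A (Python) =====
-- def create_predicate_dict(new_descr):
--     '''
--     Create a dictionary {predicate: list of all descriptions fulfilling the predicate}
--     :param new_descr: list of instantaneous valid descriptions
--     :type new_descr: list
--     :return: dictionary {predicate: list of all descriptions fulfilling the predicate}
--     :rtype: dict
--     '''
--     out_dict = {'grow': [], 'grasp': [], 'shake': []}
--
--     for d in new_descr:
--         if 'grow' in d:
--             out_dict['grow'].append(d)
--         elif 'grasp' in d: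
--             out_dict['grasp'].append(d)
--         elif 'shake' in d:
--             out_dict['shake'].append(d)
--
--     return out_dict
--
-- def detect_consumed_predicate(descr_present, descr_past):
--     '''
--     Detect if a predicate is no longer being consumed and update the description with the past accordingly
--
--     :param descr_present: list of instantaneous descriptions
--     :type descr_present: list
--     :param descr_past: list of instantenous descriptions at preivous time step
--     :type descr_past: list
--     :return: updated list of descriptions with predicate consumed (added 'was')
--     :rtype: list
--     '''
--     changed_descr = []
--     predicate_dict = create_predicate_dict(descr_present)
--     if not predicate_dict['grasp']:
--         for d in descr_past:
--             if d not in descr_present: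
--                 if 'grasp' in d:
--                     changed_descr.append('was ' + d)
--     if not predicate_dict['grow']:
--         for d in descr_past:
--             if d not in descr_present:
--                 if 'grow' in d:
--                     changed_descr.append('was ' + d)
--     if not predicate_dict['shake']:
--         for d in descr_past:
--             if d not in descr_present:
--                 if 'shake' in d:
--                     changed_descr.append('was ' + d)
--
--     return changed_descr
-- ===== SOURCE B (Python) =====
-- def detect_consumed_predicate(descr_present, descr_past):
--     '''Presence flags, a membership set and one bucketing pass over descr_past.'''
--     present = set(descr_present)
--     has_grow = any('grow' in d for d in descr_present)
--     has_grasp = any('grasp' in d and 'grow' not in d for d in descr_present)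
--     has_shake = any('shake' in d and 'grasp' not in d and 'grow' not in d
--                     for d in descr_present)
--     grasp_bucket, grow_bucket, shake_bucket = [], [], []
--     for d in descr_past:
--         if d in present:
--             continue
--         w = 'was ' + d
--         if 'grasp' in d:
--             grasp_bucket.append(w)
--         if 'grow' in d:
--             grow_bucket.append(w)
--         if 'shake' in d:
--             shake_bucket.append(w)
--     out = []
--     if not has_grasp:
--         out += grasp_bucket
--     if not has_grow:
--         out += grow_bucket
--     if not has_shake:
--         out += shake_bucket
--     return out
-- ===== Notes on version B (the rewrite author's own statement) =====
-- stated objective: faster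
-- what changed: Replaces the dict-of-lists helper plus three separately gated scans of descr_past (each doing a linear 'd not in descr_present' list scan) by boolean presence flags, a hash-set membership test and a single bucketing pass over descr_past whose three buckets are emitted at the end.
import Mathlib
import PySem

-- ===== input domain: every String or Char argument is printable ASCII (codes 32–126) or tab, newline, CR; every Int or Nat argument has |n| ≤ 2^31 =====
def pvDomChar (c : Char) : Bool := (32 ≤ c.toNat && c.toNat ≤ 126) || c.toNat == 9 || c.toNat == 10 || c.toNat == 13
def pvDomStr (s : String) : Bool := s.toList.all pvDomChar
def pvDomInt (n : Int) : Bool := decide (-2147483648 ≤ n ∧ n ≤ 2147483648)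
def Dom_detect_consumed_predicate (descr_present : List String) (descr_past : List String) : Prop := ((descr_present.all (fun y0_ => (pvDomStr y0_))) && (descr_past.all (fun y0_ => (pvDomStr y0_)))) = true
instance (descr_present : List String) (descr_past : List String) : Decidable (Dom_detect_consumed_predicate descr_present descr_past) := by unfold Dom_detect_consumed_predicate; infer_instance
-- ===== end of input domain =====

-- B replaces A's dict-of-lists helper and three gated scans of descr_past by presence
-- flags, a membership set and ONE bucketing pass over descr_past (objective: faster, measured).

-- ===== PORT A =====
-- loop body of create_predicate_dict (the if/elif chain on one description)
def cpdStep (out_dict : PySem.Dict String (List String)) (d : String) : PySem.Dict String (List String) :=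
  if PySem.Str.isIn "grow" d then out_dict.modify "grow" [] (fun l => l ++ [d])
  else if PySem.Str.isIn "grasp" d then out_dict.modify "grasp" [] (fun l => l ++ [d])
  else if PySem.Str.isIn "shake" d then out_dict.modify "shake" [] (fun l => l ++ [d])
  else out_dict

def create_predicate_dict (new_descr : List String) : PySem.Dict String (List String) :=
  new_descr.foldl cpdStep
    (((PySem.Dict.empty.insert "grow" []).insert "grasp" []).insert "shake" [])

def detect_consumed_predicate (descr_present : List String) (descr_past : List String) : List String :=
  let changed_descr : List String := []
  let predicate_dict := create_predicate_dict descr_present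
  let changed_descr :=
    if (predicate_dict.getD "grasp" []).isEmpty then
      descr_past.foldl (fun acc d =>
        if !descr_present.contains d then
          if PySem.Str.isIn "grasp" d then acc ++ ["was " ++ d] else acc
        else acc) changed_descr
    else changed_descr
  let changed_descr :=
    if (predicate_dict.getD "grow" []).isEmpty then
      descr_past.foldl (fun acc d =>
        if !descr_present.contains d then
          if PySem.Str.isIn "grow" d then acc ++ ["was " ++ d] else acc
        else acc) changed_descr
    else changed_descr
  let changed_descr :=
    if (predicate_dict.getD "shake" []).isEmpty then
      descr_past.foldl (fun acc d =>
        if !descr_present.contains d then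
          if PySem.Str.isIn "shake" d then acc ++ ["was " ++ d] else acc
        else acc) changed_descr
    else changed_descr
  changed_descr

-- ===== PORT B =====
def detect_consumed_predicate_alt (descr_present : List String) (descr_past : List String) : List String :=
  let present := PySem.Set.ofList descr_present
  let has_grow := descr_present.any (fun d => PySem.Str.isIn "grow" d)
  let has_grasp := descr_present.any (fun d => PySem.Str.isIn "grasp" d && !PySem.Str.isIn "grow" d)
  let has_shake := descr_present.any (fun d =>
    PySem.Str.isIn "shake" d && (!PySem.Str.isIn "grasp" d && !PySem.Str.isIn "grow" d))
  let buckets := descr_past.foldl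
    (fun (b : List String × List String × List String) d =>
      if PySem.Set.contains present d then b
      else
        ((if PySem.Str.isIn "grasp" d then b.1 ++ ["was " ++ d] else b.1),
         (if PySem.Str.isIn "grow" d then b.2.1 ++ ["was " ++ d] else b.2.1),
         (if PySem.Str.isIn "shake" d then b.2.2 ++ ["was " ++ d] else b.2.2)))
    ([], [], [])
  (if !has_grasp then buckets.1 else []) ++
  (if !has_grow then buckets.2.1 else []) ++
  (if !has_shake then buckets.2.2 else [])

-- ===== PRECONDITION & SPEC =====
def Spec_detect_consumed_predicate (descr_present : List String) (descr_past : List String) (out : List String) : Prop := out = detect_consumed_predicate_alt descr_present descr_past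
instance (descr_present : List String) (descr_past : List String) (out : List String) : Decidable (Spec_detect_consumed_predicate descr_present descr_past out) := by unfold Spec_detect_consumed_predicate; infer_instance

-- ===== CLAIM (what is proved, stated in full; the proofs are below) =====
def Claim_equal_detect_consumed_predicate : Prop := ∀ (descr_present : List String) (descr_past : List String), Dom_detect_consumed_predicate descr_present descr_past → Spec_detect_consumed_predicate descr_present descr_past (detect_consumed_predicate descr_present descr_past)

-- ===== LEMMAS AND PROOFS =====

-- A's gated scan as a filter-map
theorem foldl_gate (l : List String) (acc : List String) (p q : String → Bool) (f : String → String) :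
    l.foldl (fun acc d => if p d then (if q d then acc ++ [f d] else acc) else acc) acc
      = acc ++ (l.filter (fun d => p d && q d)).map f := by
  induction l generalizing acc with
  | nil => simp
  | cons x xs ih =>
    simp only [List.foldl_cons, List.filter_cons]
    by_cases hp : p x <;> by_cases hq : q x <;> simp [hp, hq, ih]

-- B's bucketing pass as three filter-maps
theorem foldl_buckets (l : List String) (b1 b2 b3 : List String)
    (pres p1 p2 p3 : String → Bool) (f : String → String) :
    l.foldl (fun (b : List String × List String × List String) d =>
        if pres d then b
        else
          ((if p1 d then b.1 ++ [f d] else b.1),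
           (if p2 d then b.2.1 ++ [f d] else b.2.1),
           (if p3 d then b.2.2 ++ [f d] else b.2.2))) (b1, b2, b3)
      = (b1 ++ (l.filter (fun d => !pres d && p1 d)).map f,
         b2 ++ (l.filter (fun d => !pres d && p2 d)).map f,
         b3 ++ (l.filter (fun d => !pres d && p3 d)).map f) := by
  induction l generalizing b1 b2 b3 with
  | nil => simp
  | cons x xs ih =>
    simp only [List.foldl_cons, List.filter_cons]
    by_cases hpr : pres x
    · simp [hpr, ih]
    · by_cases h1 : p1 x <;> by_cases h2 : p2 x <;> by_cases h3 : p3 x <;>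
        simp [hpr, h1, h2, h3, ih]

-- the three entries of A's predicate dict as filters of descr_present
theorem cpd_getD (new_descr : List String) (od : PySem.Dict String (List String)) :
    ((new_descr.foldl cpdStep od).getD "grow" []
      = od.getD "grow" [] ++ new_descr.filter (fun d => PySem.Str.isIn "grow" d))
    ∧ ((new_descr.foldl cpdStep od).getD "grasp" []
      = od.getD "grasp" [] ++ new_descr.filter
          (fun d => !PySem.Str.isIn "grow" d && PySem.Str.isIn "grasp" d))
    ∧ ((new_descr.foldl cpdStep od).getD "shake" []
      = od.getD "shake" [] ++ new_descr.filter
          (fun d => !PySem.Str.isIn "grow" d && (!PySem.Str.isIn "grasp" d && PySem.Str.isIn "shake" d))) := by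
  induction new_descr generalizing od with
  | nil => simp
  | cons x xs ih =>
    simp only [List.foldl_cons, List.filter_cons]
    refine ⟨?_, ?_, ?_⟩
    · rw [(ih (cpdStep od x)).1]
      by_cases hg : PySem.Str.isIn "grow" x <;>
        by_cases hgr : PySem.Str.isIn "grasp" x <;>
        by_cases hs : PySem.Str.isIn "shake" x <;>
        simp only [cpdStep, hg, hgr, hs, if_true] <;>
        simp [PySem.Dict.getD_modify]
    · rw [(ih (cpdStep od x)).2.1]
      by_cases hg : PySem.Str.isIn "grow" x <;>
        by_cases hgr : PySem.Str.isIn "grasp" x <;>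
        by_cases hs : PySem.Str.isIn "shake" x <;>
        simp only [cpdStep, hg, hgr, hs, if_true] <;>
        simp [PySem.Dict.getD_modify]
    · rw [(ih (cpdStep od x)).2.2]
      by_cases hg : PySem.Str.isIn "grow" x <;>
        by_cases hgr : PySem.Str.isIn "grasp" x <;>
        by_cases hs : PySem.Str.isIn "shake" x <;>
        simp only [cpdStep, hg, hgr, hs, if_true] <;>
        simp [PySem.Dict.getD_modify]

theorem set_contains_ofList (dp : List String) (d : String) :
    PySem.Set.contains (PySem.Set.ofList dp) d = dp.contains d := by
  rw [Bool.eq_iff_iff, PySem.Set.contains_iff, PySem.Set.mem_ofList]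
  simp

-- a filter is empty iff no element satisfies the (pointwise equal) predicate
theorem isEmpty_filter_eq_not_any (l : List String) (p q : String → Bool) (h : ∀ d, p d = q d) :
    (l.filter p).isEmpty = !(l.any q) := by
  induction l with
  | nil => simp
  | cons x xs ih =>
    by_cases hp : p x <;> simp [List.any_cons, ← h, hp, ih]

-- ===== VERDICT (by name: the statement is the Claim_ definition above) =====
theorem detect_consumed_predicate_spec : Claim_equal_detect_consumed_predicate := by
  intro dp dq _
  show detect_consumed_predicate dp dq = detect_consumed_predicate_alt dp dq
  obtain ⟨h1, h2, h3⟩ := cpd_getD dp (((PySem.Dict.empty.insert "grow" []).insert "grasp" []).insert "shake" [])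
  have e1 : (((PySem.Dict.empty.insert "grow" ([] : List String)).insert "grasp" []).insert "shake" []).getD "grow" [] = [] := by decide
  have e2 : (((PySem.Dict.empty.insert "grow" ([] : List String)).insert "grasp" []).insert "shake" []).getD "grasp" [] = [] := by decide
  have e3 : (((PySem.Dict.empty.insert "grow" ([] : List String)).insert "grasp" []).insert "shake" []).getD "shake" [] = [] := by decide
  rw [e1, List.nil_append] at h1; rw [e2, List.nil_append] at h2; rw [e3, List.nil_append] at h3
  simp only [detect_consumed_predicate, detect_consumed_predicate_alt, create_predicate_dict]
  simp only [h1, h2, h3]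
  rw [foldl_buckets dq [] [] []
      (fun d => PySem.Set.contains (PySem.Set.ofList dp) d)
      (fun d => PySem.Str.isIn "grasp" d)
      (fun d => PySem.Str.isIn "grow" d)
      (fun d => PySem.Str.isIn "shake" d)
      (fun d => "was " ++ d)]
  rw [foldl_gate dq _ (fun d => !dp.contains d) (fun d => PySem.Str.isIn "grasp" d) (fun d => "was " ++ d)]
  rw [foldl_gate dq _ (fun d => !dp.contains d) (fun d => PySem.Str.isIn "grow" d) (fun d => "was " ++ d)]
  rw [foldl_gate dq _ (fun d => !dp.contains d) (fun d => PySem.Str.isIn "shake" d) (fun d => "was " ++ d)]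
  have G1 : ((dp.filter (fun d => !PySem.Str.isIn "grow" d && PySem.Str.isIn "grasp" d)).isEmpty)
      = !(dp.any (fun d => PySem.Str.isIn "grasp" d && !PySem.Str.isIn "grow" d)) :=
    isEmpty_filter_eq_not_any _ _ _ (fun d => Bool.and_comm _ _)
  have G2 : ((dp.filter (fun d => PySem.Str.isIn "grow" d)).isEmpty)
      = !(dp.any (fun d => PySem.Str.isIn "grow" d)) :=
    isEmpty_filter_eq_not_any _ _ _ (fun d => rfl)
  have G3 : ((dp.filter (fun d => !PySem.Str.isIn "grow" d && (!PySem.Str.isIn "grasp" d && PySem.Str.isIn "shake" d))).isEmpty)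
      = !(dp.any (fun d => PySem.Str.isIn "shake" d && (!PySem.Str.isIn "grasp" d && !PySem.Str.isIn "grow" d))) :=
    isEmpty_filter_eq_not_any _ _ _ (fun d => by
      cases PySem.Str.isIn "grow" d <;> cases PySem.Str.isIn "grasp" d <;>
        cases PySem.Str.isIn "shake" d <;> rfl)
  simp only [List.nil_append, G1, G2, G3, set_contains_ofList]
  cases hA : dp.any (fun d => PySem.Str.isIn "grasp" d && !PySem.Str.isIn "grow" d) <;>
    cases hB : dp.any (fun d => PySem.Str.isIn "grow" d) <;>
    cases hC : dp.any (fun d => PySem.Str.isIn "shake" d && (!PySem.Str.isIn "grasp" d && !PySem.Str.isIn "grow" d)) <;>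
    simp
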